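-- pv_equiv track=rewrite | github.com/MinsangKong/Study | Codechallenge09/answer/2.py | solution
-- ===== SOURCE A (Python) =====
-- def solution(grid):
--     n, m = len(grid), len(grid[0])
--     answer = []
--     visit = [[[0]*4 for _ in range(m)] for _ in range(n)]
--     dir = [[0,1], [1,0], [0,-1], [-1,0]]
--     for i in range(n):
--         for j in range(m):
--             for k in range(4):
--                 if visit[i][j][k]:
--                     continue
--                 cnt = 0
--                 x, y, d = i, j, k
--                 while not visit[x][y][d]:
--                     visit[x][y][d] = True
--                     cnt += 1
--                     x += dir[d][0]
--                     y += dir[d][1]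
--                     x = (x + n) % n
--                     y = (y + m) % m
--                     if grid[x][y] == 'L':
--                         d = (d + 3) % 4
--                     elif grid[x][y] == 'R':
--                         d = (d + 1) % 4
--                 answer.append(cnt)
--     answer.sort()
--     return answer
-- ===== SOURCE B (Python) =====
-- def solution(grid):
--     n, m = len(grid), len(grid[0])
--     total = 4 * n * m
--
--     def step(s):
--         # flat state s = (i*m + j)*4 + k
--         k = s % 4
--         cell = s // 4
--         i, j = cell // m, cell % m
--         if k == 0:
--             j = (j + 1) % m
--         elif k == 1:
--             i = (i + 1) % n
--         elif k == 2:
--             j = (j - 1) % m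
--         else:
--             i = (i - 1) % n
--         c = grid[i][j]
--         if c == 'L':
--             k = (k + 3) % 4
--         elif c == 'R':
--             k = (k + 1) % 4
--         return (i * m + j) * 4 + k
--
--     # pass 1: pointer doubling (pointer jumping) — loop invariant:
--     # nxt[s] = step^span(s) and mn[s] = min(s, step(s), ..., step^(span-1)(s));
--     # once span >= total the window covers a whole cycle, so mn[s] is s's cycle minimum
--     nxt = [step(s) for s in range(total)]
--     mn = list(range(total))
--     span = 1
--     while span < total:
--         mn = list(map(min, mn, [mn[j] for j in nxt]))
--         nxt = [nxt[j] for j in nxt]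
--         span *= 2
--     # mn[s] is now the minimum of s's whole cycle (the window covers a full period)
--
--     # pass 2: each cycle leader (its minimal state) walks its own cycle once to measure it
--     lengths = []
--     for s in range(total):
--         if mn[s] == s:
--             t, L = step(s), 1
--             while t != s:
--                 t, L = step(t), L + 1
--             lengths.append(L)
--     lengths.sort()
--     return lengths
-- ===== Notes on version B (the rewrite author's own statement) =====
-- stated objective: alternative
-- what changed: B drops A's shared 3D visited-flag array and its emit-per-launch simulation: pass 1 builds a successor table and runs pointer-doubling (pointer-jumping) rounds that compute every flat state's cycle minimum without following any cycle step by step; pass 2 lets exactly the cycle minima ('leaders') each walk their own cycle once to measure its length.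
import Mathlib
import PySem

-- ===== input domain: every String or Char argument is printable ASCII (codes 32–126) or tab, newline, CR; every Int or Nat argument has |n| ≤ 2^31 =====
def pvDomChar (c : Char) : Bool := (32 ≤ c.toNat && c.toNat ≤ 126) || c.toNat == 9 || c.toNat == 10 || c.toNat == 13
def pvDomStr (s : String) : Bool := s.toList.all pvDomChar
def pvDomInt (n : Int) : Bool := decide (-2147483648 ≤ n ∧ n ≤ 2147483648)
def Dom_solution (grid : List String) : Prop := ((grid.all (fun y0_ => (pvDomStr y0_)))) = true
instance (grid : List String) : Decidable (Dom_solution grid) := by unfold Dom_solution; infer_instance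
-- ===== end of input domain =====

-- B replaces A's visited-flag simulation by two passes with no visited flags: pointer
-- doubling (pointer jumping) computes every flat state's cycle minimum, then each cycle's
-- minimal state alone walks its cycle once to measure it (alternative decomposition).

-- grid[x][y]; exact for in-range indices (the only way either Python reads the grid inside Pre_)
def pvCharAt (grid : List String) (x y : Nat) : Char := ((grid.getD x "").toList).getD y ' '

-- ===== PORT A =====
-- the while loop: fuel 4*n*m+1 bounds the number of iterations (each one marks a fresh state)
def pvRunA (grid : List String) (n m : Nat) : Nat → (Nat → Nat → Nat → Bool) → Int → Nat → Nat → Nat → Int × (Nat → Nat → Nat → Bool)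
  | 0, visit, cnt, _, _, _ => (cnt, visit)
  | fuel+1, visit, cnt, x, y, d =>
    if visit x y d then (cnt, visit)
    else
      let visit' : Nat → Nat → Nat → Bool := fun a b c => if a = x ∧ b = y ∧ c = d then true else visit a b c
      let x' := if d = 1 then (x + 1) % n else if d = 3 then (x + n - 1) % n else x
      let y' := if d = 0 then (y + 1) % m else if d = 2 then (y + m - 1) % m else y
      let ch := pvCharAt grid x' y'
      let d' := if ch = 'L' then (d + 3) % 4 else if ch = 'R' then (d + 1) % 4 else d
      pvRunA grid n m fuel visit' (cnt + 1) x' y' d'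

-- body of A's triple loop over (i, j, k)
def pvOuterStepA (grid : List String) (n m fuel : Nat)
    (acc : List Int × (Nat → Nat → Nat → Bool)) (t : Nat × Nat × Nat) : List Int × (Nat → Nat → Nat → Bool) :=
  if acc.2 t.1 t.2.1 t.2.2 then acc
  else
    let w := pvRunA grid n m fuel acc.2 0 t.1 t.2.1 t.2.2
    (acc.1 ++ [w.1], w.2)

def solution (grid : List String) : List Int :=
  match grid with
  | [] => []   -- Python A raises IndexError on grid[0]; excluded by Pre_solution
  | g0 :: _ =>
    let n := grid.length
    let m := g0.toList.length
    let fuel := 4 * n * m + 1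
    let r := (List.range n).foldl (fun acc i =>
      (List.range m).foldl (fun acc j =>
        (List.range 4).foldl (fun acc k => pvOuterStepA grid n m fuel acc (i, j, k)) acc) acc)
      ([], fun _ _ _ => false)
    PySem.List.sorted r.1 (fun v => v) false

-- ===== PORT B =====
-- Source B's step(s) on the flat state s = (i*m+j)*4+k; (j-1)%m and (i-1)%n are written
-- (j+m-1)%m and (i+n-1)%n, exact for the decoded 0 ≤ j < m, 0 ≤ i < n Python reaches
def pvStepB (grid : List String) (n m : Nat) (s : Nat) : Nat :=
  let k := s % 4
  let cell := s / 4
  let i := cell / m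
  let j := cell % m
  let i2 := if k = 1 then (i + 1) % n else if k = 3 then (i + n - 1) % n else i
  let j2 := if k = 0 then (j + 1) % m else if k = 2 then (j + m - 1) % m else j
  let c := pvCharAt grid i2 j2
  let k2 := if c = 'L' then (k + 3) % 4 else if c = 'R' then (k + 1) % 4 else k
  (i2 * m + j2) * 4 + k2

-- one pointer-doubling round: window minima and jump table are squared
def pvRound (total : Nat) (mn nxt : List Nat) : List Nat × List Nat :=
  ((List.range total).map (fun s => min (mn.getD s 0) (mn.getD (nxt.getD s 0) 0)),
   (List.range total).map (fun s => nxt.getD (nxt.getD s 0) 0))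

-- Source B's 'while span < total' loop; fuel total bounds its rounds (span doubles each round)
def pvDouble (total : Nat) : Nat → List Nat → List Nat → Nat → List Nat × List Nat
  | 0, mn, nxt, _ => (mn, nxt)
  | fuel+1, mn, nxt, span =>
    if span < total then
      let r := pvRound total mn nxt
      pvDouble total fuel r.1 r.2 (span * 2)
    else (mn, nxt)

-- Source B's 'while t != s' measuring walk; fuel total bounds its iterations (one cycle)
def pvLoopB (f : Nat → Nat) (s : Nat) : Nat → Nat → Int → Nat × Int
  | 0, t, L => (t, L)
  | fuel+1, t, L => if t ≠ s then pvLoopB f s fuel (f t) (L + 1) else (t, L)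

-- body of Source B's second pass: a cycle leader (mn[s] == s) measures its cycle once
def pvOuterStepB (f : Nat → Nat) (mn : List Nat) (fuel : Nat) (acc : List Int) (s : Nat) : List Int :=
  if mn.getD s 0 = s then
    let w := pvLoopB f s fuel (f s) 1
    acc ++ [w.2]
  else acc

def solution_alt (grid : List String) : List Int :=
  match grid with
  | [] => []   -- Python B raises IndexError on grid[0]; excluded by Pre_solution
  | g0 :: _ =>
    let n := grid.length
    let m := g0.toList.length
    let total := 4 * n * m
    let nxt0 := (List.range total).map (pvStepB grid n m)
    let mn0 := List.range total
    let dbl := pvDouble total total mn0 nxt0 1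
    let r := (List.range total).foldl (pvOuterStepB (pvStepB grid n m) dbl.1 total) []
    PySem.List.sorted r (fun v => v) false

-- ===== PRECONDITION & SPEC =====
-- Pre_ excludes the empty grid (grid[0] raises IndexError) and grids with a row shorter than
-- the first row (the beam reads every cell of the n×m rectangle, so grid[x][y] raises there).
def Pre_solution (grid : List String) : Prop :=
  grid ≠ [] ∧ ∀ g ∈ grid, (grid.headD "").toList.length ≤ g.toList.length
instance (grid : List String) : Decidable (Pre_solution grid) := by unfold Pre_solution; infer_instance
def pvWitness_solution : List String := ["RL", ".L"]

def Spec_solution (grid : List String) (out : List Int) : Prop := out = solution_alt grid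
instance (grid : List String) (out : List Int) : Decidable (Spec_solution grid out) := by unfold Spec_solution; infer_instance

-- ===== CLAIM (what is proved, stated in full; the proofs are below) =====
def Claim_equal_solution : Prop := ∀ (grid : List String), Dom_solution grid → Pre_solution grid → Spec_solution grid (solution grid)

-- ===== LEMMAS AND PROOFS =====

-- flat state encoding shared by B and the proof
def pvEnc (m i j k : Nat) : Nat := (i * m + j) * 4 + k

-- correspondence of A's 3D visit flags with a flat seen set on the in-range states
def pvRel (n m : Nat) (visit : Nat → Nat → Nat → Bool) (seen : Nat → Bool) : Prop :=
  ∀ a b c, a < n → b < m → c < 4 → visit a b c = seen (pvEnc m a b c)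

-- proof-side flat image of A's while loop (visited-marking walk on flat states)
def pvRunFlat (f : Nat → Nat) : Nat → (Nat → Bool) → Int → Nat → Int × (Nat → Bool)
  | 0, seen, cnt, _ => (cnt, seen)
  | fuel+1, seen, cnt, t =>
    if seen t then (cnt, seen)
    else pvRunFlat f fuel (fun a => if a = t then true else seen a) (cnt + 1) (f t)

-- proof-side flat image of A's outer-loop body
def pvOuterFlat (f : Nat → Nat) (fuel : Nat)
    (acc : List Int × (Nat → Bool)) (s : Nat) : List Int × (Nat → Bool) :=
  if acc.2 s then acc
  else
    let w := pvRunFlat f fuel acc.2 0 s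
    (acc.1 ++ [w.1], w.2)

-- minimum of the orbit of s (all iterates up to T cover the cycle)
def pvOmin (f : Nat → Nat) (T s : Nat) : Nat :=
  ((List.range T).map (fun i => f^[i] s)).foldl min s

-- prefix-window minimum computed by k pointer-doubling rounds: min over i < 2^k of f^[i] s
def pvWin (f : Nat → Nat) : Nat → Nat → Nat
  | 0, s => s
  | k+1, s => min (pvWin f k s) (pvWin f k (f^[2^k] s))

theorem pv_table_get {T : Nat} {g : Nat → Nat} {s : Nat} (h : s < T) :
    ((List.range T).map g).getD s 0 = g s := by
  rw [List.getD_eq_getElem?_getD]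
  simp [h]

theorem pv_decode_div {m i j : Nat} (hm : 0 < m) (hj : j < m) : (i * m + j) / m = i := by
  rw [Nat.add_comm, Nat.add_mul_div_right _ _ hm, Nat.div_eq_of_lt hj]; omega

theorem pv_decode_mod {m i j : Nat} (hj : j < m) : (i * m + j) % m = j := by
  rw [Nat.add_comm, Nat.add_mul_mod_self_right, Nat.mod_eq_of_lt hj]

theorem pvEnc_lt {n m i j k : Nat} (hi : i < n) (hj : j < m) (hk : k < 4) :
    pvEnc m i j k < 4 * n * m := by
  unfold pvEnc
  have h1 : i * m + j < n * m := by
    calc i * m + j < i * m + m := by omega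
    _ = (i + 1) * m := by ring
    _ ≤ n * m := Nat.mul_le_mul_right m (by omega)
  have h2 : 4 * n * m = (n * m) * 4 := by ring
  rw [h2]
  have := Nat.mul_le_mul_right 4 h1
  omega

theorem pvEnc_inj {m i j k x y d : Nat} (hj : j < m) (hk : k < 4) (hy : y < m) (hd : d < 4)
    (h : pvEnc m i j k = pvEnc m x y d) : i = x ∧ j = y ∧ k = d := by
  unfold pvEnc at h
  have hkd : k = d := by omega
  have h2 : i * m + j = x * m + y := by omega
  have hm : 0 < m := by omega
  have hjy : j = y := by
    have h3 : (i * m + j) % m = (x * m + y) % m := by rw [h2]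
    rwa [pv_decode_mod hj, pv_decode_mod hy] at h3
  have hix : i = x := by
    have h3 : (i * m + j) / m = (x * m + y) / m := by rw [h2]
    rwa [pv_decode_div hm hj, pv_decode_div hm hy] at h3
  exact ⟨hix, hjy, hkd⟩

-- B's flat step at an encoded in-range triple is the encoding of A's step
theorem pvStepB_enc (grid : List String) (n m x y d : Nat)
    (_hx : x < n) (hy : y < m) (hd : d < 4) :
    pvStepB grid n m (pvEnc m x y d) =
      (let x' := if d = 1 then (x + 1) % n else if d = 3 then (x + n - 1) % n else x
       let y' := if d = 0 then (y + 1) % m else if d = 2 then (y + m - 1) % m else y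
       let ch := pvCharAt grid x' y'
       let d' := if ch = 'L' then (d + 3) % 4 else if ch = 'R' then (d + 1) % 4 else d
       pvEnc m x' y' d') := by
  have hm : 0 < m := by omega
  have e1 : ((x * m + y) * 4 + d) % 4 = d := by omega
  have e2 : ((x * m + y) * 4 + d) / 4 = x * m + y := by omega
  have e3 : (x * m + y) / m = x := pv_decode_div hm hy
  have e4 : (x * m + y) % m = y := pv_decode_mod hy
  simp only [pvStepB, pvEnc, e1, e2, e3, e4]

-- A's step stays in range
theorem pv_step_range {n m x y d : Nat} (hn : 0 < n) (hm : 0 < m)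
    (hx : x < n) (hy : y < m) (hd : d < 4) (grid : List String) :
    (if d = 1 then (x + 1) % n else if d = 3 then (x + n - 1) % n else x) < n ∧
    (if d = 0 then (y + 1) % m else if d = 2 then (y + m - 1) % m else y) < m ∧
    (if pvCharAt grid (if d = 1 then (x + 1) % n else if d = 3 then (x + n - 1) % n else x)
        (if d = 0 then (y + 1) % m else if d = 2 then (y + m - 1) % m else y) = 'L' then (d + 3) % 4
     else if pvCharAt grid (if d = 1 then (x + 1) % n else if d = 3 then (x + n - 1) % n else x)
        (if d = 0 then (y + 1) % m else if d = 2 then (y + m - 1) % m else y) = 'R' then (d + 1) % 4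
     else d) < 4 := by
  refine ⟨?_, ?_, ?_⟩
  · split_ifs <;> first | exact Nat.mod_lt _ hn | exact hx
  · split_ifs <;> first | exact Nat.mod_lt _ hm | exact hy
  · split_ifs <;> omega

-- inner bisimulation: A's while loop and the flat visited walk run in lockstep
theorem pv_walk_bisim (grid : List String) (n m : Nat) (hn : 0 < n) (hm : 0 < m) :
    ∀ fuel visit seen cnt x y d, x < n → y < m → d < 4 → pvRel n m visit seen →
      (pvRunA grid n m fuel visit cnt x y d).1 =
        (pvRunFlat (pvStepB grid n m) fuel seen cnt (pvEnc m x y d)).1 ∧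
      pvRel n m (pvRunA grid n m fuel visit cnt x y d).2
        (pvRunFlat (pvStepB grid n m) fuel seen cnt (pvEnc m x y d)).2 := by
  intro fuel
  induction fuel with
  | zero => intro visit seen cnt x y d _ _ _ hrel; exact ⟨rfl, hrel⟩
  | succ f ih =>
    intro visit seen cnt x y d hx hy hd hrel
    rw [pvRunA, pvRunFlat]
    rw [hrel x y d hx hy hd]
    by_cases hv : seen (pvEnc m x y d) = true
    · simp only [if_pos hv]; exact ⟨trivial, hrel⟩
    · simp only [if_neg hv]
      rw [pvStepB_enc grid n m x y d hx hy hd]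
      obtain ⟨hx', hy', hd'⟩ := pv_step_range hn hm hx hy hd grid
      refine ih _ _ _ _ _ _ hx' hy' hd' ?_
      intro a b c ha hb hc
      by_cases he : a = x ∧ b = y ∧ c = d
      · obtain ⟨e1, e2, e3⟩ := he
        subst e1; subst e2; subst e3
        simp
      · have hne : pvEnc m a b c ≠ pvEnc m x y d := by
          intro h
          exact he (pvEnc_inj hb hc hy hd h)
        simp only [if_neg he, if_neg hne]
        exact hrel a b c ha hb hc

-- outer bisimulation over any list of in-range start states
theorem pv_outer_bisim (grid : List String) (n m fuel : Nat) (hn : 0 < n) (hm : 0 < m) :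
    ∀ (L : List (Nat × Nat × Nat)) (ans : List Int) (visit : Nat → Nat → Nat → Bool) (seen : Nat → Bool),
      (∀ t ∈ L, t.1 < n ∧ t.2.1 < m ∧ t.2.2 < 4) → pvRel n m visit seen →
      (L.foldl (pvOuterStepA grid n m fuel) (ans, visit)).1 =
        ((L.map (fun t => pvEnc m t.1 t.2.1 t.2.2)).foldl (pvOuterFlat (pvStepB grid n m) fuel) (ans, seen)).1 ∧
      pvRel n m (L.foldl (pvOuterStepA grid n m fuel) (ans, visit)).2
        ((L.map (fun t => pvEnc m t.1 t.2.1 t.2.2)).foldl (pvOuterFlat (pvStepB grid n m) fuel) (ans, seen)).2 := by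
  intro L
  induction L with
  | nil => intro ans visit seen _ hrel; exact ⟨rfl, hrel⟩
  | cons t L ih =>
    intro ans visit seen hmem hrel
    obtain ⟨hx, hy, hd⟩ := hmem t (List.mem_cons_self ..)
    have hbody := pv_walk_bisim grid n m hn hm fuel visit seen 0 t.1 t.2.1 t.2.2 hx hy hd hrel
    simp only [List.map_cons, List.foldl_cons]
    have h1 : pvOuterStepA grid n m fuel (ans, visit) t =
        ((pvOuterFlat (pvStepB grid n m) fuel (ans, seen) (pvEnc m t.1 t.2.1 t.2.2)).1,
          (pvOuterStepA grid n m fuel (ans, visit) t).2) := by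
      unfold pvOuterStepA pvOuterFlat
      dsimp only
      simp only [hrel t.1 t.2.1 t.2.2 hx hy hd]
      by_cases hv : seen (pvEnc m t.1 t.2.1 t.2.2) = true
      · simp only [if_pos hv]
      · simp only [if_neg hv, hbody.1]
    have h2 : pvRel n m (pvOuterStepA grid n m fuel (ans, visit) t).2
        (pvOuterFlat (pvStepB grid n m) fuel (ans, seen) (pvEnc m t.1 t.2.1 t.2.2)).2 := by
      unfold pvOuterStepA pvOuterFlat
      dsimp only
      simp only [hrel t.1 t.2.1 t.2.2 hx hy hd]
      by_cases hv : seen (pvEnc m t.1 t.2.1 t.2.2) = true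
      · simp only [if_pos hv]; exact hrel
      · simp only [if_neg hv]; exact hbody.2
    have hrest := ih (pvOuterFlat (pvStepB grid n m) fuel (ans, seen) (pvEnc m t.1 t.2.1 t.2.2)).1
      (pvOuterStepA grid n m fuel (ans, visit) t).2
      (pvOuterFlat (pvStepB grid n m) fuel (ans, seen) (pvEnc m t.1 t.2.1 t.2.2)).2
      (fun u hu => hmem u (List.mem_cons_of_mem _ hu)) h2
    rw [h1]
    exact hrest

-- range-product identity: flatMap of shifted ranges is one long range
theorem pv_range_mul (b : Nat) : ∀ a, (List.range a).flatMap (fun i => (List.range b).map (fun t => i * b + t)) = List.range (a * b) := by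
  intro a
  induction a with
  | zero => simp
  | succ a ih =>
    rw [List.range_succ, List.flatMap_append, ih, Nat.succ_mul, List.range_add]
    simp [List.flatMap, Nat.add_comm, Nat.mul_comm]

-- the triple loop's start states, flattened
def pvTriples (n m : Nat) : List (Nat × Nat × Nat) :=
  (List.range n).flatMap (fun i => (List.range m).flatMap (fun j => (List.range 4).map (fun k => (i, j, k))))

theorem pvTriples_mem {n m : Nat} : ∀ t ∈ pvTriples n m, t.1 < n ∧ t.2.1 < m ∧ t.2.2 < 4 := by
  intro t ht
  unfold pvTriples at ht
  simp only [List.mem_flatMap, List.mem_map, List.mem_range] at ht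
  obtain ⟨i, hi, j, hj, k, hk, rfl⟩ := ht
  exact ⟨hi, hj, hk⟩

-- the triple loop's start states encode exactly to range(4*n*m), in order
theorem pvTriples_map_enc (n m : Nat) :
    (pvTriples n m).map (fun t => pvEnc m t.1 t.2.1 t.2.2) = List.range (4 * n * m) := by
  unfold pvTriples
  rw [List.map_flatMap]
  have inner : ∀ i : Nat, ((List.range m).flatMap (fun j => (List.range 4).map (fun k => ((i, j, k) : Nat × Nat × Nat)))).map
      (fun t => pvEnc m t.1 t.2.1 t.2.2) = (List.range (m * 4)).map (fun t => i * (m * 4) + t) := by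
    intro i
    rw [← pv_range_mul 4 m, List.map_flatMap, List.map_flatMap]
    refine List.flatMap_congr (fun j _ => ?_)
    rw [List.map_map, List.map_map]
    refine List.map_congr_left (fun k _ => ?_)
    simp only [Function.comp_apply, pvEnc]
    ring
  have h4 : 4 * n * m = n * (m * 4) := by ring
  calc (List.range n).flatMap (fun i => ((List.range m).flatMap (fun j => (List.range 4).map (fun k => ((i, j, k) : Nat × Nat × Nat)))).map
      (fun t => pvEnc m t.1 t.2.1 t.2.2))
      = (List.range n).flatMap (fun i => (List.range (m * 4)).map (fun t => i * (m * 4) + t)) := by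
        exact List.flatMap_congr (fun i _ => inner i)
    _ = List.range (n * (m * 4)) := pv_range_mul (m * 4) n
    _ = List.range (4 * n * m) := by rw [h4]

theorem pv_foldl_flatMap {α β γ : Type} (g : β → γ → β) (f : α → List γ) :
    ∀ (l : List α) (init : β), (l.flatMap f).foldl g init = l.foldl (fun acc a => (f a).foldl g acc) init := by
  intro l
  induction l with
  | nil => intro init; rfl
  | cons a l ih => intro init; rw [List.flatMap_cons, List.foldl_append, List.foldl_cons, ih]

-- nested foldl = foldl over the flattened triples
theorem pv_fold_flatten (grid : List String) (n m fuel : Nat) (init : List Int × (Nat → Nat → Nat → Bool)) :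
    (List.range n).foldl (fun acc i =>
      (List.range m).foldl (fun acc j =>
        (List.range 4).foldl (fun acc k => pvOuterStepA grid n m fuel acc (i, j, k)) acc) acc) init =
    (pvTriples n m).foldl (pvOuterStepA grid n m fuel) init := by
  unfold pvTriples
  simp only [pv_foldl_flatMap, List.foldl_map]

theorem pv_foldl_id {α β : Type} : ∀ (l : List α) (init : β), l.foldl (fun acc _ => acc) init = init := by
  intro l
  induction l with
  | nil => intro init; rfl
  | cons a l ih => intro init; rw [List.foldl_cons, ih]

-- ===== orbit theory for an injective self-map of [0, T) =====

theorem pv_it_lt {f : Nat → Nat} {T : Nat} (hr : ∀ s, s < T → f s < T)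
    {s : Nat} (hs : s < T) : ∀ i, f^[i] s < T := by
  intro i
  induction i with
  | zero => simpa using hs
  | succ i ih => rw [Function.iterate_succ_apply']; exact hr _ ih

theorem pv_it_cancel {f : Nat → Nat} {T : Nat} (hr : ∀ s, s < T → f s < T)
    (hi : ∀ a b, a < T → b < T → f a = f b → a = b)
    {s : Nat} (hs : s < T) : ∀ a i j, f^[a + i] s = f^[a + j] s → f^[i] s = f^[j] s := by
  intro a
  induction a with
  | zero => intro i j h; simpa using h
  | succ a ih =>
    intro i j h
    have e1 : a + 1 + i = (a + i) + 1 := by omega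
    have e2 : a + 1 + j = (a + j) + 1 := by omega
    rw [e1, e2, Function.iterate_succ_apply', Function.iterate_succ_apply'] at h
    exact ih i j (hi _ _ (pv_it_lt hr hs _) (pv_it_lt hr hs _) h)

theorem pv_per_exists {f : Nat → Nat} {T : Nat} (hr : ∀ s, s < T → f s < T)
    (hi : ∀ a b, a < T → b < T → f a = f b → a = b)
    {s : Nat} (hs : s < T) : ∃ p, 0 < p ∧ p ≤ T ∧ f^[p] s = s := by
  have hmap : ∀ i ∈ Finset.range (T + 1), f^[i] s ∈ Finset.range T := by
    intro i _
    exact Finset.mem_range.mpr (pv_it_lt hr hs i)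
  have hcard : (Finset.range T).card < (Finset.range (T + 1)).card := by
    simp
  obtain ⟨a, ha, b, hb, hab, heq⟩ :=
    Finset.exists_ne_map_eq_of_card_lt_of_maps_to hcard hmap
  simp only [Finset.mem_range] at ha hb
  rcases Nat.lt_or_ge a b with hlt | hge
  · refine ⟨b - a, by omega, by omega, ?_⟩
    have h1 : f^[a + (b - a)] s = f^[a + 0] s := by
      have : a + (b - a) = b := by omega
      rw [this]; simpa using heq.symm
    simpa using pv_it_cancel hr hi hs a (b - a) 0 h1
  · have hlt : b < a := by omega
    refine ⟨a - b, by omega, by omega, ?_⟩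
    have h1 : f^[b + (a - b)] s = f^[b + 0] s := by
      have : b + (a - b) = a := by omega
      rw [this]; simpa using heq
    simpa using pv_it_cancel hr hi hs b (a - b) 0 h1

theorem pv_it_mod {f : Nat → Nat} {s p : Nat} (hp : 0 < p) (hps : f^[p] s = s) :
    ∀ i, f^[i] s = f^[i % p] s := by
  intro i
  induction i using Nat.strong_induction_on with
  | _ i ih =>
    rcases Nat.lt_or_ge i p with h | h
    · rw [Nat.mod_eq_of_lt h]
    · have e : i = (i - p) + p := by omega
      rw [e, Function.iterate_add_apply, hps, Nat.add_mod_right]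
      exact ih (i - p) (by omega)

theorem pv_fold_min_le : ∀ (l : List Nat) (a : Nat), l.foldl min a ≤ a ∧ ∀ x ∈ l, l.foldl min a ≤ x := by
  intro l
  induction l with
  | nil => intro a; exact ⟨le_refl a, by simp⟩
  | cons b l ih =>
    intro a
    rw [List.foldl_cons]
    refine ⟨le_trans (ih (min a b)).1 (Nat.min_le_left a b), ?_⟩
    intro x hx
    rcases List.mem_cons.mp hx with rfl | hx
    · exact le_trans (ih (min a x)).1 (Nat.min_le_right a x)
    · exact (ih (min a b)).2 x hx

theorem pv_fold_min_mem : ∀ (l : List Nat) (a : Nat), l.foldl min a = a ∨ l.foldl min a ∈ l := by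
  intro l
  induction l with
  | nil => intro a; exact Or.inl rfl
  | cons b l ih =>
    intro a
    rw [List.foldl_cons]
    rcases Nat.le_total a b with h | h
    · rw [Nat.min_eq_left h]
      rcases ih a with h1 | h1
      · exact Or.inl h1
      · exact Or.inr (List.mem_cons_of_mem _ h1)
    · rw [Nat.min_eq_right h]
      rcases ih b with h1 | h1
      · exact Or.inr (by rw [h1]; exact List.mem_cons_self ..)
      · exact Or.inr (List.mem_cons_of_mem _ h1)

theorem pv_omin_le_self (f : Nat → Nat) (T s : Nat) : pvOmin f T s ≤ s := by
  unfold pvOmin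
  exact (pv_fold_min_le ((List.range T).map (fun i => f^[i] s)) s).1

-- pvOmin is a lower bound for EVERY iterate (indices reduced mod a period)
theorem pv_omin_le_iter {f : Nat → Nat} {T : Nat} (hr : ∀ s, s < T → f s < T)
    (hi : ∀ a b, a < T → b < T → f a = f b → a = b)
    {s : Nat} (hs : s < T) : ∀ i, pvOmin f T s ≤ f^[i] s := by
  obtain ⟨p, hp, hpT, hps⟩ := pv_per_exists hr hi hs
  intro i
  have h1 : f^[i] s = f^[i % p] s := pv_it_mod hp hps i
  rw [h1]
  have hiT : i % p < T := lt_of_lt_of_le (Nat.mod_lt _ hp) hpT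
  unfold pvOmin
  exact (pv_fold_min_le ((List.range T).map (fun i => f^[i] s)) s).2 _
    (List.mem_map.mpr ⟨i % p, List.mem_range.mpr hiT, rfl⟩)

-- pvOmin is attained at some iterate below T
theorem pv_omin_mem (f : Nat → Nat) {T s : Nat} (hs : s < T) :
    ∃ i, i < T ∧ pvOmin f T s = f^[i] s := by
  unfold pvOmin
  rcases pv_fold_min_mem ((List.range T).map (fun i => f^[i] s)) s with h | h
  · exact ⟨0, by omega, by simpa using h⟩
  · obtain ⟨i, hi, he⟩ := List.mem_map.mp h
    exact ⟨i, List.mem_range.mp hi, he.symm⟩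

-- pvOmin is constant along the orbit
theorem pv_omin_step {f : Nat → Nat} {T : Nat} (hr : ∀ s, s < T → f s < T)
    (hi : ∀ a b, a < T → b < T → f a = f b → a = b)
    {s : Nat} (hs : s < T) : pvOmin f T (f s) = pvOmin f T s := by
  have hfs : f s < T := hr s hs
  refine Nat.le_antisymm ?_ ?_
  · obtain ⟨b, hbT, hb⟩ := pv_omin_mem f hs
    rcases Nat.eq_zero_or_pos b with rfl | hb0
    · obtain ⟨p, hp, hpT, hps⟩ := pv_per_exists hr hi hs
      have h1 : f^[p - 1] (f s) = s := by
        rw [← Function.iterate_succ_apply]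
        simp only [Nat.succ_eq_add_one]
        have e : p - 1 + 1 = p := by omega
        rw [e, hps]
      simp only [Function.iterate_zero_apply] at hb
      calc pvOmin f T (f s) ≤ f^[p - 1] (f s) := pv_omin_le_iter hr hi hfs _
        _ = s := h1
        _ = pvOmin f T s := hb.symm
    · have h1 : f^[b - 1] (f s) = f^[b] s := by
        rw [← Function.iterate_succ_apply]
        simp only [Nat.succ_eq_add_one]
        congr 1
        omega
      calc pvOmin f T (f s) ≤ f^[b - 1] (f s) := pv_omin_le_iter hr hi hfs _
        _ = f^[b] s := h1
        _ = pvOmin f T s := hb.symm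
  · obtain ⟨a, haT, ha⟩ := pv_omin_mem f hfs
    calc pvOmin f T s ≤ f^[a + 1] s := pv_omin_le_iter hr hi hs _
      _ = f^[a] (f s) := Function.iterate_succ_apply f a s
      _ = pvOmin f T (f s) := ha.symm

theorem pv_omin_iterate {f : Nat → Nat} {T : Nat} (hr : ∀ s, s < T → f s < T)
    (hi : ∀ a b, a < T → b < T → f a = f b → a = b)
    {s : Nat} (hs : s < T) : ∀ i, pvOmin f T (f^[i] s) = pvOmin f T s := by
  intro i
  induction i with
  | zero => simp
  | succ i ih =>
    rw [Function.iterate_succ_apply', pv_omin_step hr hi (pv_it_lt hr hs i), ih]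

-- an element whose orbit minimum is s lies on the cycle of s
theorem pv_orbit_of_omin {f : Nat → Nat} {T : Nat} (hr : ∀ s, s < T → f s < T)
    (hi : ∀ a b, a < T → b < T → f a = f b → a = b)
    {s x p : Nat} (hx : x < T) (hp : 0 < p) (hps : f^[p] s = s)
    (h : pvOmin f T x = s) : ∃ a, a < p ∧ x = f^[a] s := by
  obtain ⟨b, hbT, hb⟩ := pv_omin_mem f hx
  obtain ⟨q, hq, hqT, hqx⟩ := pv_per_exists hr hi hx
  have hb' : f^[b % q] x = s := by rw [← pv_it_mod hq hqx b, ← hb, h]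
  have hbq : b % q < q := Nat.mod_lt _ hq
  have hxc : x = f^[q - b % q] s := by
    rw [← hb']
    rw [← Function.iterate_add_apply]
    have e : q - b % q + b % q = q := by omega
    rw [e, hqx]
  refine ⟨(q - b % q) % p, Nat.mod_lt _ hp, ?_⟩
  rw [hxc, pv_it_mod hp hps]

-- ===== characterisation of the two inner loops =====

-- A's flat walk launched at the minimum of an untouched cycle: counts the period,
-- marks exactly the cycle
theorem pv_runFlat_leader {f : Nat → Nat} {T : Nat} (hr : ∀ s, s < T → f s < T)
    (hi : ∀ a b, a < T → b < T → f a = f b → a = b)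
    {s p : Nat} (hs : s < T) (hp : 0 < p) (hps : f^[p] s = s)
    (hmin : ∀ i, 0 < i → i < p → f^[i] s ≠ s)
    {seen : Nat → Bool} (hseen : ∀ i, seen (f^[i] s) = false) :
    ∀ fuel i (cur : Nat → Bool) (cnt : Int), i ≤ p → p - i ≤ fuel →
      (∀ x, cur x = true ↔ (seen x = true ∨ ∃ a, a < i ∧ x = f^[a] s)) →
      (pvRunFlat f fuel cur cnt (f^[i] s)).1 = cnt + ((p - i : Nat) : Int) ∧
      ∀ x, (pvRunFlat f fuel cur cnt (f^[i] s)).2 x = true ↔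
        (seen x = true ∨ ∃ a, a < p ∧ x = f^[a] s) := by
  intro fuel
  induction fuel with
  | zero =>
    intro i cur cnt hip hfu hcur
    have hipe : i = p := by omega
    subst hipe
    rw [pvRunFlat]
    exact ⟨by simp, by simpa using hcur⟩
  | succ fu ih =>
    intro i cur cnt hip hfu hcur
    rw [pvRunFlat]
    rcases Nat.lt_or_ge i p with hlt | hge
    · have hnot : cur (f^[i] s) = false := by
        rw [Bool.eq_false_iff]
        intro hc
        rcases (hcur _).mp hc with h1 | ⟨a, ha, he⟩
        · rw [hseen i] at h1; exact Bool.false_ne_true h1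
        · have h2 : f^[a + (i - a)] s = f^[a + 0] s := by
            have e : a + (i - a) = i := by omega
            rw [e]; simpa using he
          have h3 := pv_it_cancel hr hi hs a (i - a) 0 h2
          simp only [Function.iterate_zero_apply] at h3
          exact hmin (i - a) (by omega) (by omega) h3
      simp only [hnot]
      simp only [Bool.false_eq_true, if_false]
      rw [← Function.iterate_succ_apply' f i s]
      have hres := ih (i + 1) (fun a => if a = f^[i] s then true else cur a) (cnt + 1)
        (by omega) (by omega) ?_
      · refine ⟨?_, hres.2⟩
        rw [hres.1]
        have : p - i = (p - (i + 1)) + 1 := by omega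
        rw [this]
        push_cast
        ring
      · intro x
        dsimp only
        by_cases hx : x = f^[i] s
        · rw [if_pos hx]
          subst hx
          constructor
          · intro _
            exact Or.inr ⟨i, by omega, rfl⟩
          · intro _
            rfl
        · rw [if_neg hx, hcur x]
          constructor
          · rintro (h1 | ⟨a, ha, he⟩)
            · exact Or.inl h1
            · exact Or.inr ⟨a, by omega, he⟩
          · rintro (h1 | ⟨a, ha, he⟩)
            · exact Or.inl h1
            · rcases Nat.lt_or_ge a i with h2 | h2
              · exact Or.inr ⟨a, h2, he⟩
              · have hae : a = i := by omega
                subst hae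
                exact absurd he hx
    · have hipe : i = p := by omega
      rw [hipe] at hcur ⊢
      have hmark : cur (f^[p] s) = true := by
        rw [hps]
        exact (hcur s).mpr (Or.inr ⟨0, hp, by simp⟩)
      rw [if_pos hmark]
      exact ⟨by simp, by simpa using hcur⟩

-- ===== pvWin: window minima, and the pointer-doubling loop computes them =====

theorem pv_win_le_iter {f : Nat → Nat} : ∀ k s i, i < 2 ^ k → pvWin f k s ≤ f^[i] s := by
  intro k
  induction k with
  | zero =>
    intro s i hi
    have : i = 0 := by simpa using Nat.lt_one_iff.mp (by simpa using hi)
    subst this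
    simp [pvWin]
  | succ k ih =>
    intro s i hi
    rcases Nat.lt_or_ge i (2 ^ k) with h | h
    · calc pvWin f (k + 1) s ≤ pvWin f k s := Nat.min_le_left _ _
        _ ≤ f^[i] s := ih s i h
    · have hi' : i - 2 ^ k < 2 ^ k := by
        have : 2 ^ (k + 1) = 2 ^ k + 2 ^ k := by rw [pow_succ]; omega
        omega
      have he : f^[i] s = f^[i - 2 ^ k] (f^[2 ^ k] s) := by
        rw [← Function.iterate_add_apply]
        congr 1
        omega
      calc pvWin f (k + 1) s ≤ pvWin f k (f^[2 ^ k] s) := Nat.min_le_right _ _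
        _ ≤ f^[i - 2 ^ k] (f^[2 ^ k] s) := ih _ _ hi'
        _ = f^[i] s := he.symm

theorem pv_win_mem {f : Nat → Nat} : ∀ k s, ∃ i, i < 2 ^ k ∧ pvWin f k s = f^[i] s := by
  intro k
  induction k with
  | zero => intro s; exact ⟨0, by norm_num, by simp [pvWin]⟩
  | succ k ih =>
    intro s
    have hsplit : 2 ^ (k + 1) = 2 ^ k + 2 ^ k := by rw [pow_succ]; omega
    rcases Nat.le_total (pvWin f k s) (pvWin f k (f^[2 ^ k] s)) with hc | hc
    · obtain ⟨i, hi, he⟩ := ih s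
      refine ⟨i, by omega, ?_⟩
      show min (pvWin f k s) (pvWin f k (f^[2 ^ k] s)) = f^[i] s
      rw [Nat.min_eq_left hc, he]
    · obtain ⟨i, hi, he⟩ := ih (f^[2 ^ k] s)
      refine ⟨i + 2 ^ k, by omega, ?_⟩
      show min (pvWin f k s) (pvWin f k (f^[2 ^ k] s)) = f^[i + 2 ^ k] s
      rw [Nat.min_eq_right hc, he, ← Function.iterate_add_apply]

theorem pv_win_eq_omin {f : Nat → Nat} {T : Nat} (hr : ∀ s, s < T → f s < T)
    (hi : ∀ a b, a < T → b < T → f a = f b → a = b)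
    {s k : Nat} (hs : s < T) (hk : T ≤ 2 ^ k) : pvWin f k s = pvOmin f T s := by
  refine Nat.le_antisymm ?_ ?_
  · obtain ⟨b, hbT, hb⟩ := pv_omin_mem f hs
    rw [hb]
    exact pv_win_le_iter k s b (by omega)
  · obtain ⟨i, hiw, he⟩ := pv_win_mem (f := f) k s
    rw [he]
    exact pv_omin_le_iter hr hi hs i

-- the doubling loop ends with the full-cycle minima table
theorem pv_double_spec {f : Nat → Nat} {T : Nat} (hr : ∀ s, s < T → f s < T) :
    ∀ fuel k span, span = 2 ^ k → T ≤ 2 ^ k + fuel →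
      ∃ K, T ≤ 2 ^ K ∧
        (pvDouble T fuel ((List.range T).map (pvWin f k))
          ((List.range T).map (fun s => f^[2 ^ k] s)) span).1 =
          (List.range T).map (pvWin f K) := by
  intro fuel
  induction fuel with
  | zero =>
    intro k span hspan hT
    exact ⟨k, by omega, rfl⟩
  | succ fu ih =>
    intro k span hspan hT
    rw [pvDouble]
    by_cases hlt : span < T
    · rw [if_pos hlt]
      have hround : pvRound T ((List.range T).map (pvWin f k))
          ((List.range T).map (fun s => f^[2 ^ k] s)) =
          ((List.range T).map (pvWin f (k + 1)),
           (List.range T).map (fun s => f^[2 ^ (k + 1)] s)) := by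
        unfold pvRound
        rw [Prod.mk.injEq]
        constructor
        · refine List.map_congr_left (fun s hsm => ?_)
          have hs : s < T := List.mem_range.mp hsm
          have hfs : f^[2 ^ k] s < T := pv_it_lt hr hs _
          rw [pv_table_get hs, pv_table_get hs, pv_table_get hfs]
          rfl
        · refine List.map_congr_left (fun s hsm => ?_)
          have hs : s < T := List.mem_range.mp hsm
          have hfs : f^[2 ^ k] s < T := pv_it_lt hr hs _
          rw [pv_table_get hs, pv_table_get hfs, ← Function.iterate_add_apply]
          congr 1
          rw [pow_succ]
          omega
      dsimp only
      rw [hround]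
      have h2k : 0 < 2 ^ k := Nat.two_pow_pos k
      have hsp : span * 2 = 2 ^ (k + 1) := by rw [hspan, pow_succ]
      have hT' : T ≤ 2 ^ (k + 1) + fu := by
        have : 2 ^ (k + 1) = 2 ^ k + 2 ^ k := by rw [pow_succ]; omega
        omega
      exact ih (k + 1) (span * 2) hsp hT'
    · rw [if_neg hlt]
      exact ⟨k, by omega, rfl⟩

-- B's measuring walk from a cycle leader returns after exactly one period
theorem pv_loopB_run {f : Nat → Nat} {s p : Nat} (hp : 0 < p) (hps : f^[p] s = s)
    (hmin : ∀ i, 0 < i → i < p → f^[i] s ≠ s) :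
    ∀ fuel i (c : Int), 0 < i → i ≤ p → p - i ≤ fuel →
      pvLoopB f s fuel (f^[i] s) c = (s, c + ((p - i : Nat) : Int)) := by
  intro fuel
  induction fuel with
  | zero =>
    intro i c hi0 hij hfu
    have : i = p := by omega
    subst this
    rw [pvLoopB, hps]
    simp
  | succ fu ih =>
    intro i c hi0 hij hfu
    rw [pvLoopB]
    rcases Nat.lt_or_ge i p with hlt | hge
    · rw [if_pos (hmin i hi0 hlt)]
      rw [← Function.iterate_succ_apply' f i s]
      rw [ih (i + 1) (c + 1) (by omega) (by omega) (by omega)]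
      have : (p - i : Nat) = (p - (i + 1)) + 1 := by omega
      rw [this]
      push_cast
      ring_nf
    · have : i = p := by omega
      subst this
      rw [hps, if_neg (by simp)]
      simp

-- ===== the crux: A's flat visited fold = B's leader fold =====

theorem pv_main_fold {f : Nat → Nat} {T : Nat} (hr : ∀ s, s < T → f s < T)
    (hi : ∀ a b, a < T → b < T → f a = f b → a = b)
    {fuelA fuelB : Nat} (hfa : T ≤ fuelA) (hfb : T ≤ fuelB) :
    ∀ s, s ≤ T →
      ((List.range s).foldl (pvOuterFlat f fuelA) ([], fun _ => false)).1 =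
        (List.range s).foldl (pvOuterStepB f ((List.range T).map (pvOmin f T)) fuelB) [] ∧
      ∀ x, ((List.range s).foldl (pvOuterFlat f fuelA) ([], fun _ => false)).2 x = true ↔
        (x < T ∧ pvOmin f T x < s) := by
  intro s
  induction s with
  | zero =>
    intro _
    simp only [List.range_zero, List.foldl_nil]
    refine ⟨trivial, fun x => ?_⟩
    simp
  | succ s ih =>
    intro hsT
    obtain ⟨ihL, ihS⟩ := ih (by omega)
    have hsT' : s < T := by omega
    rw [List.range_succ, List.foldl_append, List.foldl_append, List.foldl_cons, List.foldl_cons,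
      List.foldl_nil, List.foldl_nil]
    set accA := (List.range s).foldl (pvOuterFlat f fuelA) ([], fun _ => false) with haccA
    set accB := (List.range s).foldl (pvOuterStepB f ((List.range T).map (pvOmin f T)) fuelB) [] with haccB
    have homle : pvOmin f T s ≤ s := pv_omin_le_self f T s
    have hmn : ((List.range T).map (pvOmin f T)).getD s 0 = pvOmin f T s := pv_table_get hsT'
    rcases Nat.lt_or_ge (pvOmin f T s) s with hml | hmg
    · -- s is not its cycle's minimum: A skips (already visited), B's leader test is false
      have hseen : accA.2 s = true := (ihS s).mpr ⟨hsT', hml⟩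
      constructor
      · have hA : pvOuterFlat f fuelA accA s = accA := by
          unfold pvOuterFlat
          rw [if_pos hseen]
        have hB : pvOuterStepB f ((List.range T).map (pvOmin f T)) fuelB accB s = accB := by
          unfold pvOuterStepB
          rw [hmn, if_neg (by omega)]
        rw [hA, hB]
        exact ihL
      · intro x
        unfold pvOuterFlat
        rw [if_pos hseen]
        rw [ihS x]
        constructor
        · rintro ⟨h1, h2⟩; exact ⟨h1, by omega⟩
        · rintro ⟨h1, h2⟩
          refine ⟨h1, ?_⟩
          rcases Nat.lt_or_ge (pvOmin f T x) s with h3 | h3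
          · exact h3
          · exfalso
            have hxe : pvOmin f T x = s := by omega
            obtain ⟨p, hp, hpT, hps⟩ := pv_per_exists hr hi hsT'
            obtain ⟨a, hap, hae⟩ := pv_orbit_of_omin hr hi h1 hp hps hxe
            have h4 : pvOmin f T x = pvOmin f T s := by
              rw [hae]; exact pv_omin_iterate hr hi hsT' a
            omega
    · -- s is its cycle's minimum: A walks the whole cycle, B's leader test fires
      have hms : pvOmin f T s = s := by omega
      obtain ⟨q, hq, hqT, hqs⟩ := pv_per_exists hr hi hsT'
      have hQex : ∃ p, 0 < p ∧ f^[p] s = s := ⟨q, hq, hqs⟩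
      obtain ⟨p, ⟨hp0, hps⟩, hpmin', hpT⟩ :
          ∃ p, (0 < p ∧ f^[p] s = s) ∧ (∀ i, i < p → ¬(0 < i ∧ f^[i] s = s)) ∧ p ≤ T :=
        ⟨Nat.find hQex, Nat.find_spec hQex, fun i hij => Nat.find_min hQex hij,
          le_trans (Nat.find_min' hQex ⟨hq, hqs⟩) hqT⟩
      have hmin : ∀ i, 0 < i → i < p → f^[i] s ≠ s := by
        intro i hi0 hip he
        exact (hpmin' i hip) ⟨hi0, he⟩
      have hseen : accA.2 s = false := by
        rw [Bool.eq_false_iff]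
        intro hc
        have := (ihS s).mp hc
        omega
      have hseenorb : ∀ i, accA.2 (f^[i] s) = false := by
        intro i
        rw [Bool.eq_false_iff]
        intro hc
        obtain ⟨h1, h2⟩ := (ihS _).mp hc
        rw [pv_omin_iterate hr hi hsT' i] at h2
        omega
      have hwalk := pv_runFlat_leader hr hi hsT' hp0 hps hmin hseenorb fuelA 0 accA.2 0
        (by omega) (by omega) (by intro x; simp)
      simp only [Function.iterate_zero_apply, Nat.sub_zero] at hwalk
      have hrun := pv_loopB_run hp0 hps hmin fuelB 1 1 (by omega) (by omega) (by omega)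
      simp only [Function.iterate_one] at hrun
      constructor
      · have hB : pvOuterStepB f ((List.range T).map (pvOmin f T)) fuelB accB s =
            accB ++ [(1 : Int) + ((p - 1 : Nat) : Int)] := by
          unfold pvOuterStepB
          rw [hmn, if_pos hms]
          dsimp only
          rw [hrun]
        have hA : (pvOuterFlat f fuelA accA s).1 = accA.1 ++ [(0 : Int) + ((p : Nat) : Int)] := by
          unfold pvOuterFlat
          rw [if_neg (by simp [hseen])]
          dsimp only
          rw [hwalk.1]
        rw [hA, hB, ihL]
        congr 2
        omega
      · intro x
        unfold pvOuterFlat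
        rw [if_neg (by simp [hseen])]
        dsimp only
        rw [hwalk.2 x, ihS x]
        constructor
        · rintro (⟨h1, h2⟩ | ⟨a, ha, rfl⟩)
          · exact ⟨h1, by omega⟩
          · refine ⟨pv_it_lt hr hsT' a, ?_⟩
            rw [pv_omin_iterate hr hi hsT' a]
            omega
        · rintro ⟨h1, h2⟩
          rcases Nat.lt_or_ge (pvOmin f T x) s with h3 | h3
          · exact Or.inl ⟨h1, h3⟩
          · have hxe : pvOmin f T x = s := by omega
            obtain ⟨a, hap, hae⟩ := pv_orbit_of_omin hr hi h1 hp0 hps hxe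
            exact Or.inr ⟨a, hap, hae⟩

-- ===== pvStepB is a self-map of [0, 4*n*m) and injective there =====

theorem pv_decode {n m s : Nat} (hm : 0 < m) (hs : s < 4 * n * m) :
    s / 4 / m < n ∧ s / 4 % m < m ∧ s % 4 < 4 ∧ pvEnc m (s / 4 / m) (s / 4 % m) (s % 4) = s := by
  have h1 : s / 4 < n * m := by
    rw [Nat.div_lt_iff_lt_mul (by omega)]
    calc s < 4 * n * m := hs
      _ = n * m * 4 := by ring
  have h2 : s / 4 / m < n := by
    rw [Nat.div_lt_iff_lt_mul hm]
    omega
  refine ⟨h2, Nat.mod_lt _ hm, by omega, ?_⟩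
  unfold pvEnc
  have e1 : s / 4 / m * m + s / 4 % m = s / 4 := by
    rw [Nat.mul_comm]
    exact Nat.div_add_mod (s / 4) m
  rw [e1]
  omega

theorem pv_stepB_eq_encoded {n m s : Nat} (hm : 0 < m) (hs : s < 4 * n * m) :
    ∃ x y d, x < n ∧ y < m ∧ d < 4 ∧ s = pvEnc m x y d := by
  obtain ⟨h1, h2, h3, h4⟩ := pv_decode (n := n) hm hs
  exact ⟨_, _, _, h1, h2, h3, h4.symm⟩

theorem pv_stepB_range (grid : List String) {n m : Nat} (hn : 0 < n) (hm : 0 < m) :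
    ∀ s, s < 4 * n * m → pvStepB grid n m s < 4 * n * m := by
  intro s hs
  obtain ⟨x, y, d, hx, hy, hd, rfl⟩ := pv_stepB_eq_encoded hm hs
  rw [pvStepB_enc grid n m x y d hx hy hd]
  obtain ⟨h1, h2, h3⟩ := pv_step_range hn hm hx hy hd grid
  exact pvEnc_lt h1 h2 h3

-- the two modular moves are injective on [0, n)
theorem pv_mod_inc_inj {n a b : Nat} (ha : a < n) (hb : b < n)
    (h : (a + 1) % n = (b + 1) % n) : a = b := by
  have e : ∀ x : Nat, x < n → (x + 1) % n = if x + 1 = n then 0 else x + 1 := by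
    intro x hx
    by_cases hc : x + 1 = n
    · rw [hc, Nat.mod_self]; simp
    · rw [Nat.mod_eq_of_lt (by omega)]; simp [hc]
  rw [e a ha, e b hb] at h
  split_ifs at h <;> omega

theorem pv_mod_dec_inj {n a b : Nat} (ha : a < n) (hb : b < n)
    (h : (a + n - 1) % n = (b + n - 1) % n) : a = b := by
  have e : ∀ x : Nat, x < n → (x + n - 1) % n = if x = 0 then n - 1 else x - 1 := by
    intro x hx
    by_cases hc : x = 0
    · subst hc
      rw [Nat.mod_eq_of_lt (by omega)]
      simp
    · have e2 : x + n - 1 = (x - 1) + n := by omega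
      rw [e2, Nat.add_mod_right, Nat.mod_eq_of_lt (by omega)]
      simp [hc]
  rw [e a ha, e b hb] at h
  split_ifs at h <;> omega

theorem pv_stepB_inj (grid : List String) {n m : Nat} (hn : 0 < n) (hm : 0 < m) :
    ∀ a b, a < 4 * n * m → b < 4 * n * m →
      pvStepB grid n m a = pvStepB grid n m b → a = b := by
  intro a b ha hb hab
  obtain ⟨x1, y1, d1, hx1, hy1, hd1, rfl⟩ := pv_stepB_eq_encoded hm ha
  obtain ⟨x2, y2, d2, hx2, hy2, hd2, rfl⟩ := pv_stepB_eq_encoded hm hb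
  rw [pvStepB_enc grid n m x1 y1 d1 hx1 hy1 hd1, pvStepB_enc grid n m x2 y2 d2 hx2 hy2 hd2] at hab
  simp only [] at hab
  obtain ⟨r11, r12, r13⟩ := pv_step_range hn hm hx1 hy1 hd1 grid
  obtain ⟨r21, r22, r23⟩ := pv_step_range hn hm hx2 hy2 hd2 grid
  obtain ⟨ex, ey, ed⟩ := pvEnc_inj r12 r13 r22 r23 hab
  -- same landing cell, hence same char, hence same pre-turn direction
  have hchar : pvCharAt grid (if d1 = 1 then (x1 + 1) % n else if d1 = 3 then (x1 + n - 1) % n else x1)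
      (if d1 = 0 then (y1 + 1) % m else if d1 = 2 then (y1 + m - 1) % m else y1) =
      pvCharAt grid (if d2 = 1 then (x2 + 1) % n else if d2 = 3 then (x2 + n - 1) % n else x2)
      (if d2 = 0 then (y2 + 1) % m else if d2 = 2 then (y2 + m - 1) % m else y2) := by
    rw [ex, ey]
  have hd12 : d1 = d2 := by
    rw [hchar] at ed
    split_ifs at ed <;> omega
  subst hd12
  -- same direction: the moved coordinate is injective, the other is unchanged
  have hxe : x1 = x2 := by
    by_cases h1 : d1 = 1
    · simp only [h1] at ex
      norm_num at ex
      exact pv_mod_inc_inj hx1 hx2 ex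
    · by_cases h3 : d1 = 3
      · simp only [h3] at ex
        norm_num at ex
        exact pv_mod_dec_inj hx1 hx2 ex
      · simpa [h1, h3] using ex
  have hye : y1 = y2 := by
    by_cases h0 : d1 = 0
    · simp only [h0] at ey
      norm_num at ey
      exact pv_mod_inc_inj hy1 hy2 ey
    · by_cases h2 : d1 = 2
      · simp only [h2] at ey
        norm_num at ey
        exact pv_mod_dec_inj hy1 hy2 ey
      · simpa [h0, h2] using ey
  rw [hxe, hye]

-- ===== VERDICT (by name: the statement is the Claim_ definition above) =====
theorem solution_spec : Claim_equal_solution := by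
  unfold Claim_equal_solution
  intro grid _ _
  unfold Spec_solution
  cases grid with
  | nil => rfl
  | cons g0 rest =>
    simp only [solution, solution_alt]
    refine congrArg (fun l => PySem.List.sorted l (fun v => v) false) ?_
    by_cases hm : g0.toList.length = 0
    · rw [hm]
      simp only [Nat.mul_zero, List.range_zero, List.foldl_nil, pv_foldl_id]
    · have hm' : 0 < g0.toList.length := by omega
      have hn : 0 < (g0 :: rest).length := by simp
      set n := (g0 :: rest).length
      set m := g0.toList.length
      set T := 4 * n * m with hT
      have hr := pv_stepB_range (g0 :: rest) hn hm'
      have hinj := pv_stepB_inj (g0 :: rest) hn hm'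
      set f := pvStepB (g0 :: rest) n m with hf
      -- A's nested fold = the flat visited fold
      have hflat : ((List.range n).foldl (fun acc i =>
          (List.range m).foldl (fun acc j =>
            (List.range 4).foldl (fun acc k => pvOuterStepA (g0 :: rest) n m (T + 1) acc (i, j, k)) acc) acc)
          ([], fun _ _ _ => false)).1 =
          ((List.range T).foldl (pvOuterFlat f (T + 1)) ([], fun _ => false)).1 := by
        rw [pv_fold_flatten, ← pvTriples_map_enc]
        exact (pv_outer_bisim (g0 :: rest) n m (T + 1) hn hm' (pvTriples n m) []
          (fun _ _ _ => false) (fun _ => false) pvTriples_mem (fun _ _ _ _ _ _ => rfl)).1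
      rw [hflat]
      -- B's doubling pass produces the cycle-minima table
      have e1 : (List.range T).map (pvWin f 0) = List.range T := by
        rw [show pvWin f 0 = fun s => s from rfl, List.map_id']
      have e2 : (List.range T).map (fun s => f^[2 ^ 0] s) = (List.range T).map f := by
        refine List.map_congr_left (fun s _ => ?_)
        simp
      obtain ⟨K, hK, hdbl⟩ := pv_double_spec hr T 0 1 (by norm_num) (by omega)
      rw [e1, e2] at hdbl
      have hdbl' : (pvDouble T T (List.range T) ((List.range T).map f) 1).1 =
          (List.range T).map (pvOmin f T) := by
        rw [hdbl]
        refine List.map_congr_left (fun s hsm => ?_)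
        exact pv_win_eq_omin hr hinj (List.mem_range.mp hsm) hK
      rw [hdbl']
      exact (pv_main_fold hr hinj (fuelA := T + 1) (fuelB := T) (by omega) (by omega) T (le_refl _)).1
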